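-- pv_equiv track=rewrite | github.com/dhlab-epfl/fdh-tutorials | crf/utils/tags_format.py | iob2_to_biluo
-- ===== SOURCE A (Python) =====
-- def iob2_to_biluo(tags):
--     out = []
--     for i, tag in enumerate(tags):
--         if tag == 'O':
--             out.append(tag)
--         elif tag[0] == 'B':
--             if i + 1 < len(tags) and tags[i + 1][0] == "I":
--                 out.append(tag)
--             else:
--                 out.append('U' + tag[1:])
--         else:
--             if i + 1 < len(tags) and tags[i + 1][0] == 'I':
--                 out.append(tag)
--             else:
--                 out.append('L' + tag[1:])
--     return out
-- ===== SOURCE B (Python) =====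
-- def iob2_to_biluo(tags):
--     res = []
--     next_is_i = False
--     for tag in reversed(tags):
--         if tag == 'O':
--             res.append(tag)
--         elif tag[0] == 'B':
--             res.append(tag if next_is_i else 'U' + tag[1:])
--         else:
--             res.append(tag if next_is_i else 'L' + tag[1:])
--         next_is_i = tag[0] == 'I'
--     res.reverse()
--     return res
-- ===== Notes on version B (the rewrite author's own statement) =====
-- stated objective: alternative
-- what changed: Replaces the i+1 index lookahead over enumerate(tags) by a single backward pass that carries a next_is_i flag, so no indexing into the list is needed; the collected output is reversed at the end.
import Mathlib
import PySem

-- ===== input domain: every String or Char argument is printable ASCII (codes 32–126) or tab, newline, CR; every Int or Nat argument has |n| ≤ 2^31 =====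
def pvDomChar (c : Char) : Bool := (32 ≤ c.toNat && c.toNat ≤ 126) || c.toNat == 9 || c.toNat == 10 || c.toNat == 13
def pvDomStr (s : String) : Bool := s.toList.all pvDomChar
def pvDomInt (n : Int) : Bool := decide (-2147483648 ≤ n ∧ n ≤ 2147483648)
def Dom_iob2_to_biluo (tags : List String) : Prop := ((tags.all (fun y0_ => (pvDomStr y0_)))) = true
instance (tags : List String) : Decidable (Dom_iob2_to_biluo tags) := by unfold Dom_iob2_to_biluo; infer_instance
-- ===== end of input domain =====

-- B replaces A's i+1 index lookahead by a single backward pass carrying a next_is_i flag (alternative decomposition, same cost).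

-- ===== PORT A =====
-- Literal port of A: fold over enumerate(tags); tags[i+1][0] is read with pyGetD (default only
-- reachable when the short-circuiting bound check i+1 < len(tags) is false, so it is exact).
def iob2_to_biluo (tags : List String) : List String :=
  (PySem.List.enumerate tags).foldl (fun out it =>
    let i := it.1
    let tag := it.2
    if tag = "O" then
      out ++ [tag]
    else if PySem.Str.pyGet? tag 0 = some 'B' then
      if i + 1 < PySem.List.len tags ∧
         PySem.Str.pyGet? (PySem.List.pyGetD tags (i + 1) "") 0 = some 'I' then
        out ++ [tag]
      else
        out ++ ["U" ++ PySem.Str.slice tag (some 1) none]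
    else
      if i + 1 < PySem.List.len tags ∧
         PySem.Str.pyGet? (PySem.List.pyGetD tags (i + 1) "") 0 = some 'I' then
        out ++ [tag]
      else
        out ++ ["L" ++ PySem.Str.slice tag (some 1) none]) []

-- ===== PORT B =====
-- Literal port of Source B: fold over reversed(tags) carrying (res, next_is_i); reverse res at the end.
def iob2_to_biluo_alt (tags : List String) : List String :=
  (tags.reverse.foldl (fun (st : List String × Bool) tag =>
    let res :=
      if tag = "O" then
        st.1 ++ [tag]
      else if PySem.Str.pyGet? tag 0 = some 'B' then
        st.1 ++ [if st.2 then tag else "U" ++ PySem.Str.slice tag (some 1) none]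
      else
        st.1 ++ [if st.2 then tag else "L" ++ PySem.Str.slice tag (some 1) none]
    (res, PySem.Str.pyGet? tag 0 == some 'I')) ([], false)).1.reverse

-- ===== PRECONDITION & SPEC =====
-- Pre_ excludes exactly the inputs containing an empty-string tag: there Python A raises
-- IndexError at tag[0] (and Python B raises the same way).
def Pre_iob2_to_biluo (tags : List String) : Prop := ∀ t ∈ tags, t ≠ ""
instance (tags : List String) : Decidable (Pre_iob2_to_biluo tags) := by unfold Pre_iob2_to_biluo; infer_instance
def pvWitness_iob2_to_biluo : List String := ["B-PER", "I-PER", "O", "B-LOC"]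
def Spec_iob2_to_biluo (tags : List String) (out : List String) : Prop := out = iob2_to_biluo_alt tags
instance (tags : List String) (out : List String) : Decidable (Spec_iob2_to_biluo tags out) := by unfold Spec_iob2_to_biluo; infer_instance

-- ===== CLAIM (what is proved, stated in full; the proofs are below) =====
def Claim_equal_iob2_to_biluo : Prop := ∀ (tags : List String), Dom_iob2_to_biluo tags → Pre_iob2_to_biluo tags → Spec_iob2_to_biluo tags (iob2_to_biluo tags)

-- ===== LEMMAS AND PROOFS =====

-- A common recursive characterisation: emit each tag according to whether the NEXT tag starts with 'I'.
def pvEmit (nextI : Bool) (tag : String) : String :=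
  if tag = "O" then tag
  else if PySem.Str.pyGet? tag 0 = some 'B' then
    (if nextI then tag else "U" ++ PySem.Str.slice tag (some 1) none)
  else
    (if nextI then tag else "L" ++ PySem.Str.slice tag (some 1) none)

def pvNextI : List String → Bool
  | [] => false
  | t :: _ => PySem.Str.pyGet? t 0 == some 'I'

def pvSpec : List String → List String
  | [] => []
  | t :: rest => pvEmit (pvNextI rest) t :: pvSpec rest

theorem pv_A_gen (l : List String) : ∀ (pre out : List String),
    ((PySem.List.enumerate l ((pre.length : Int))).foldl (fun out it =>
      let i := it.1
      let tag := it.2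
      if tag = "O" then
        out ++ [tag]
      else if PySem.Str.pyGet? tag 0 = some 'B' then
        if i + 1 < PySem.List.len (pre ++ l) ∧
           PySem.Str.pyGet? (PySem.List.pyGetD (pre ++ l) (i + 1) "") 0 = some 'I' then
          out ++ [tag]
        else
          out ++ ["U" ++ PySem.Str.slice tag (some 1) none]
      else
        if i + 1 < PySem.List.len (pre ++ l) ∧
           PySem.Str.pyGet? (PySem.List.pyGetD (pre ++ l) (i + 1) "") 0 = some 'I' then
          out ++ [tag]
        else
          out ++ ["L" ++ PySem.Str.slice tag (some 1) none]) out) = out ++ pvSpec l := by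
  induction l with
  | nil => intro pre out; simp [PySem.List.enumerate_nil, pvSpec]
  | cons t rest ih =>
    intro pre out
    rw [PySem.List.enumerate_cons]
    simp only [List.foldl_cons]
    have hpre : (pre.length : Int) + 1 = (((pre ++ [t]).length : Nat) : Int) := by
      simp
    have hlist : pre ++ t :: rest = (pre ++ [t]) ++ rest := by simp
    have hguard : ((pre.length : Int) + 1 < PySem.List.len (pre ++ t :: rest) ∧
        PySem.Str.pyGet? (PySem.List.pyGetD (pre ++ t :: rest) ((pre.length : Int) + 1) "") 0 = some 'I')
        ↔ pvNextI rest = true := by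
      rw [hpre, hlist, PySem.List.pyGetD_natCast]
      cases rest with
      | nil =>
        constructor
        · rintro ⟨h, -⟩
          rw [PySem.List.len_eq] at h
          simp at h
        · intro h; simp [pvNextI] at h
      | cons u rest' =>
        have hget : ((pre ++ [t]) ++ u :: rest').getD (pre ++ [t]).length "" = u := by
          simp [List.getD]
        rw [hget, PySem.List.len_eq]
        constructor
        · rintro ⟨-, h⟩; simpa [pvNextI] using h
        · intro h
          refine ⟨by simp only [List.length_append, List.length_cons]; push_cast; omega, ?_⟩
          simpa [pvNextI] using h
    have hinit : (if t = "O" then out ++ [t]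
        else if PySem.Str.pyGet? t 0 = some 'B' then
          if (pre.length : Int) + 1 < PySem.List.len (pre ++ t :: rest) ∧
             PySem.Str.pyGet? (PySem.List.pyGetD (pre ++ t :: rest) ((pre.length : Int) + 1) "") 0 = some 'I' then
            out ++ [t]
          else out ++ ["U" ++ PySem.Str.slice t (some 1) none]
        else
          if (pre.length : Int) + 1 < PySem.List.len (pre ++ t :: rest) ∧
             PySem.Str.pyGet? (PySem.List.pyGetD (pre ++ t :: rest) ((pre.length : Int) + 1) "") 0 = some 'I' then
            out ++ [t]
          else out ++ ["L" ++ PySem.Str.slice t (some 1) none])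
        = out ++ [pvEmit (pvNextI rest) t] := by
      unfold pvEmit
      by_cases hO : t = "O"
      · rw [if_pos hO, if_pos hO]
      · rw [if_neg hO, if_neg hO]
        by_cases hg : pvNextI rest = true
        · have hg' := hguard.mpr hg
          by_cases hB : PySem.Str.pyGet? t 0 = some 'B'
          · rw [if_pos hB, if_pos hg', if_pos hB, if_pos hg]
          · rw [if_neg hB, if_pos hg', if_neg hB, if_pos hg]
        · have hg' : ¬ ((pre.length : Int) + 1 < PySem.List.len (pre ++ t :: rest) ∧
              PySem.Str.pyGet? (PySem.List.pyGetD (pre ++ t :: rest) ((pre.length : Int) + 1) "") 0 = some 'I') :=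
            fun h => hg (hguard.mp h)
          by_cases hB : PySem.Str.pyGet? t 0 = some 'B'
          · rw [if_pos hB, if_neg hg', if_pos hB, if_neg hg]
          · rw [if_neg hB, if_neg hg', if_neg hB, if_neg hg]
    rw [hinit]
    have hout : out ++ pvSpec (t :: rest) = (out ++ [pvEmit (pvNextI rest) t]) ++ pvSpec rest := by
      simp [pvSpec]
    rw [hout, hlist, hpre]
    exact ih (pre ++ [t]) (out ++ [pvEmit (pvNextI rest) t])

theorem pv_A_eq (tags : List String) : iob2_to_biluo tags = pvSpec tags := by
  have h := pv_A_gen tags [] []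
  simpa [iob2_to_biluo] using h

theorem pv_B_gen (l : List String) :
    (l.reverse.foldl (fun (st : List String × Bool) tag =>
      let res :=
        if tag = "O" then
          st.1 ++ [tag]
        else if PySem.Str.pyGet? tag 0 = some 'B' then
          st.1 ++ [if st.2 then tag else "U" ++ PySem.Str.slice tag (some 1) none]
        else
          st.1 ++ [if st.2 then tag else "L" ++ PySem.Str.slice tag (some 1) none]
      (res, PySem.Str.pyGet? tag 0 == some 'I')) ([], false))
    = ((pvSpec l).reverse, pvNextI l) := by
  induction l with
  | nil => simp [pvSpec, pvNextI]
  | cons t rest ih =>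
    rw [List.reverse_cons, List.foldl_append, ih]
    simp only [List.foldl_cons, List.foldl_nil]
    refine Prod.ext ?_ rfl
    show (if t = "O" then (pvSpec rest).reverse ++ [t]
        else if PySem.Str.pyGet? t 0 = some 'B' then
          (pvSpec rest).reverse ++ [if pvNextI rest then t else "U" ++ PySem.Str.slice t (some 1) none]
        else
          (pvSpec rest).reverse ++ [if pvNextI rest then t else "L" ++ PySem.Str.slice t (some 1) none])
        = (pvSpec (t :: rest)).reverse
    rw [show pvSpec (t :: rest) = pvEmit (pvNextI rest) t :: pvSpec rest from rfl,
      List.reverse_cons]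
    unfold pvEmit
    by_cases hO : t = "O"
    · rw [if_pos hO, if_pos hO]
    · rw [if_neg hO, if_neg hO]
      by_cases hB : PySem.Str.pyGet? t 0 = some 'B'
      · rw [if_pos hB, if_pos hB]
      · rw [if_neg hB, if_neg hB]

theorem pv_B_eq (tags : List String) : iob2_to_biluo_alt tags = pvSpec tags := by
  unfold iob2_to_biluo_alt
  rw [pv_B_gen]
  simp

-- ===== VERDICT (by name: the statement is the Claim_ definition above) =====
theorem iob2_to_biluo_spec : Claim_equal_iob2_to_biluo := by
  intro tags _ _
  unfold Spec_iob2_to_biluo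
  rw [pv_A_eq, pv_B_eq]
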